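-- pv_equiv track=rewrite | github.com/VirArman/Polytechnic | chess/main.py | generate_queen_moves
-- ===== SOURCE A (Python) =====
-- DIMENSION = 8
--
-- def generate_queen_moves(row, col, board,color):
--     # Գեներացնում է թագուհու քայլերը
--     # Որպես արգւմենտ ստանում է թագուհու գտնվելու սյունակը, տողը, խաղատախտակի վիճակը և թագուհու գույնը
--     # և վերադարձնում է բոլոր հնարավոր քայլերը
--     possible_moves = []
--     #horizontal moves
--     for i in range(col-1,-1,-1):
--         if board[row][i][0] == color:
--             break
--         if board[row][i] == "--" or board[row][i][0] != color:
--             possible_moves.append((row, i))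
--         if board[row][i][0] == "b":
--             break
--
--     for i in range(col+1,DIMENSION,1):
--         if board[row][i][0] == color:
--             break
--         if board[row][i] == "--" or board[row][i][0] != color:
--             possible_moves.append((row, i))
--         if board[row][i][0] == "b":
--             break
--     # vertical moves
--     for i in range(row+1,DIMENSION,1):
--         if board[i][col][0] == color:
--             break
--         if board[i][col] == "--" or board[i][col][0] != color :
--             possible_moves.append((i, col))
--         if board[i][col][0] == "b" :
--             break
--
--     for i in range(row-1,-1,-1):
--         if board[i][col][0] == color:
--             break
--         if board[i][col] == "--" or board[i][col][0] != color:
--             possible_moves.append((i, col))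
--         if board[i][col][0] == "b":
--             break
--     #diagonal
--     for i in range(1,DIMENSION):
--         if row-i >= 0 and col+i<DIMENSION:
--             if board[row-i][col+i][0] == color:
--                 break
--             if board[row-i][col+i] == "--" or board[row-i][col+i][0] != color:
--                 possible_moves.append((row-i, col+i))
--             if board[row-i][col+i][0] == "b":
--                 break
--     for i in range(1,DIMENSION):
--         if col-i >= 0 and row+i<DIMENSION:
--             if board[row+i][col-i][0] == color:
--                 break
--             if board[row+i][col-i] == "--" or board[row+i][col-i][0] != color:
--                 possible_moves.append((row+i, col-i))
--             if board[row+i][col-i][0] == "b":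
--                 break
--     for i in range(1,DIMENSION):
--         if row-i >= 0 and col-i >= 0:
--             if board[row-i][col-i][0] == color:
--                 break
--             if board[row-i][col-i] == "--" or board[row-i][col-i][0] != color:
--                 possible_moves.append((row-i, col-i))
--             if board[row-i][col-i][0] == "b":
--                 break
--     for i in range(1,DIMENSION):
--         if row+i < DIMENSION and col+i<DIMENSION:
--             if board[row+i][col+i][0] == color:
--                 break
--             if board[row+i][col+i] == "--" or board[row+i][col+i][0] != color:
--                 possible_moves.append((row+i, col+i))
--             if board[row+i][col+i][0] == "b":
--                 break
--
--     return possible_moves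
-- ===== SOURCE B (Python) =====
-- DIMENSION = 8
--
-- def _ray_limit(row, col, dr, dc, geo, board, color):
--     # Distance of the last reachable square along one direction: scan outward up to
--     # the geometric limit; a piece of the queen's own colour stops before it, a
--     # piece whose name starts with 'b' stops on it.
--     for t in range(1, geo + 1):
--         piece = board[row + dr * t][col + dc * t][0]
--         if piece == color:
--             return t - 1
--         if piece == "b":
--             return t
--     return geo
--
-- def generate_queen_moves(row, col, board, color):
--     # Two stages instead of eight append-as-you-walk loops: first compute, per
--     # direction, the blocking distance (a single number); then emit the moves
--     # purely arithmetically from those eight distances without touching the board.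
--     dirs = [(0, -1), (0, 1), (1, 0), (-1, 0), (-1, 1), (1, -1), (-1, -1), (1, 1)]
--     E = DIMENSION - 1
--     geos = [col, E - col, E - row, row,
--             min(E, row, E - col), min(E, col, E - row),
--             min(E, row, col), min(E, E - row, E - col)]
--     limits = []
--     for d in range(8):
--         dr, dc = dirs[d]
--         limits.append(_ray_limit(row, col, dr, dc, geos[d], board, color))
--     moves = []
--     for d in range(8):
--         dr, dc = dirs[d]
--         for t in range(1, limits[d] + 1):
--             moves.append((row + dr * t, col + dc * t))
--     return moves
-- ===== Notes on version B (the rewrite author's own statement) =====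
-- stated objective: alternative
-- what changed: A interleaves scanning and move collection in eight copied append-as-you-walk loops; B works in two staged passes: it first computes, per direction, the blocking distance as a single number (a helper scanning the ray: own colour stops before it, a 'b' piece on it), and then emits all moves purely arithmetically from those eight distances without touching the board again.
import Mathlib
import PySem

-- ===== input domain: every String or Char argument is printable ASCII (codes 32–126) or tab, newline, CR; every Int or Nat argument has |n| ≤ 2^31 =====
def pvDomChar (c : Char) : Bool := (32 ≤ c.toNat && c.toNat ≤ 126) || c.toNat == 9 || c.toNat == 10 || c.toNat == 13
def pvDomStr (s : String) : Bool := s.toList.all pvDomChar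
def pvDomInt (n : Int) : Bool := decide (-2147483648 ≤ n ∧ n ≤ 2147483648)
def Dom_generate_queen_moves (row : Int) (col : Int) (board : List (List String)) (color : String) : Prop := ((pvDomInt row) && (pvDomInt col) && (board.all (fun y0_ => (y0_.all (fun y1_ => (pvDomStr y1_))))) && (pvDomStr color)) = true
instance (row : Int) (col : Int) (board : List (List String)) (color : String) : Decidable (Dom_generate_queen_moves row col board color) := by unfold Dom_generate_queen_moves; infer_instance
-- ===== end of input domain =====

-- B replaces A's eight append-as-you-walk loops by two staged passes: first compute, per
-- direction, the blocking distance (one number) by scanning the ray, then emit the moves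
-- purely arithmetically from those eight distances (alternative decomposition; same cost).

-- ===== PORT A =====
-- board[r][c] via Python indexing (negative indices wrap); the getD defaults stand for squares whose
-- read would raise in Python, which never happens on inputs admitted by Pre_
def pvCellAt (board : List (List String)) (r c : Int) : String :=
  (PySem.List.pyGet? ((PySem.List.pyGet? board r).getD []) c).getD ""

-- cell[0] as a 1-character string (Python's s[0]); the getD "" stands for the empty cell whose read
-- would raise in Python, which never happens on inputs admitted by Pre_
def pvFirst0 (s : String) : String :=
  ((PySem.Str.pyGet? s 0).map (fun ch => String.ofList [ch])).getD ""

-- the two horizontal loops: break on own color; conditional append; break on 'b'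
def pvARow (row : Int) (board : List (List String)) (color : String) : List Int → List (Int × Int)
  | [] => []
  | i :: is =>
    let cell := pvCellAt board row i
    if pvFirst0 cell == color then []
    else (if cell == "--" || !(pvFirst0 cell == color) then [(row, i)] else [])
      ++ (if pvFirst0 cell == "b" then [] else pvARow row board color is)

-- the two vertical loops
def pvACol (col : Int) (board : List (List String)) (color : String) : List Int → List (Int × Int)
  | [] => []
  | i :: is =>
    let cell := pvCellAt board i col
    if pvFirst0 cell == color then []
    else (if cell == "--" || !(pvFirst0 cell == color) then [(i, col)] else [])
      ++ (if pvFirst0 cell == "b" then [] else pvACol col board color is)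

-- diagonal loop 1: guard row-i >= 0 and col+i < 8, skipping (not breaking) when the guard fails
def pvADiagUR (row col : Int) (board : List (List String)) (color : String) : List Int → List (Int × Int)
  | [] => []
  | i :: is =>
    if row - i ≥ 0 ∧ col + i < 8 then
      let cell := pvCellAt board (row - i) (col + i)
      if pvFirst0 cell == color then []
      else (if cell == "--" || !(pvFirst0 cell == color) then [(row - i, col + i)] else [])
        ++ (if pvFirst0 cell == "b" then [] else pvADiagUR row col board color is)
    else pvADiagUR row col board color is

-- diagonal loop 2: guard col-i >= 0 and row+i < 8
def pvADiagDL (row col : Int) (board : List (List String)) (color : String) : List Int → List (Int × Int)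
  | [] => []
  | i :: is =>
    if col - i ≥ 0 ∧ row + i < 8 then
      let cell := pvCellAt board (row + i) (col - i)
      if pvFirst0 cell == color then []
      else (if cell == "--" || !(pvFirst0 cell == color) then [(row + i, col - i)] else [])
        ++ (if pvFirst0 cell == "b" then [] else pvADiagDL row col board color is)
    else pvADiagDL row col board color is

-- diagonal loop 3: guard row-i >= 0 and col-i >= 0
def pvADiagUL (row col : Int) (board : List (List String)) (color : String) : List Int → List (Int × Int)
  | [] => []
  | i :: is =>
    if row - i ≥ 0 ∧ col - i ≥ 0 then
      let cell := pvCellAt board (row - i) (col - i)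
      if pvFirst0 cell == color then []
      else (if cell == "--" || !(pvFirst0 cell == color) then [(row - i, col - i)] else [])
        ++ (if pvFirst0 cell == "b" then [] else pvADiagUL row col board color is)
    else pvADiagUL row col board color is

-- diagonal loop 4: guard row+i < 8 and col+i < 8
def pvADiagDR (row col : Int) (board : List (List String)) (color : String) : List Int → List (Int × Int)
  | [] => []
  | i :: is =>
    if row + i < 8 ∧ col + i < 8 then
      let cell := pvCellAt board (row + i) (col + i)
      if pvFirst0 cell == color then []
      else (if cell == "--" || !(pvFirst0 cell == color) then [(row + i, col + i)] else [])
        ++ (if pvFirst0 cell == "b" then [] else pvADiagDR row col board color is)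
    else pvADiagDR row col board color is

def generate_queen_moves (row : Int) (col : Int) (board : List (List String)) (color : String) : List (Int × Int) :=
  pvARow row board color (PySem.List.pyRange (col - 1) (-1) (-1))
    ++ pvARow row board color (PySem.List.pyRange (col + 1) 8 1)
    ++ pvACol col board color (PySem.List.pyRange (row + 1) 8 1)
    ++ pvACol col board color (PySem.List.pyRange (row - 1) (-1) (-1))
    ++ pvADiagUR row col board color (PySem.List.pyRange 1 8 1)
    ++ pvADiagDL row col board color (PySem.List.pyRange 1 8 1)
    ++ pvADiagUL row col board color (PySem.List.pyRange 1 8 1)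
    ++ pvADiagDR row col board color (PySem.List.pyRange 1 8 1)

-- ===== PORT B =====
-- Source B's direction table, in A's emission order
def pvDirs : List (Int × Int) := [(0, -1), (0, 1), (1, 0), (-1, 0), (-1, 1), (1, -1), (-1, -1), (1, 1)]

-- Source B's geos list: the geometric limit of each direction (distance to the edge it moves
-- toward; diagonals are additionally capped by A's range(1, 8))
def pvGeos (row col : Int) : List Int :=
  [col, 7 - col, 7 - row, row,
   min 7 (min row (7 - col)), min 7 (min col (7 - row)),
   min 7 (min row col), min 7 (min (7 - row) (7 - col))]

-- Source B's _ray_limit loop body: scan outward, own colour stops before, 'b' stops on it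
def pvRayLimitLoop (row col dr dc : Int) (board : List (List String)) (color : String)
    (geo : Int) : List Int → Int
  | [] => geo
  | t :: ts =>
    let piece := pvFirst0 (pvCellAt board (row + dr * t) (col + dc * t))
    if piece == color then t - 1
    else if piece == "b" then t
    else pvRayLimitLoop row col dr dc board color geo ts

-- Source B's _ray_limit: the loop over range(1, geo+1), returning geo if nothing stops the ray
def pvRayLimit (row col dr dc geo : Int) (board : List (List String)) (color : String) : Int :=
  pvRayLimitLoop row col dr dc board color geo (PySem.List.pyRange 1 (geo + 1) 1)

def generate_queen_moves_alt (row : Int) (col : Int) (board : List (List String)) (color : String) : List (Int × Int) :=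
  let limits := (PySem.List.pyRange 0 8 1).foldl (fun acc d =>
      let p := (PySem.List.pyGet? pvDirs d).getD (0, 0)
      acc ++ [pvRayLimit row col p.1 p.2 ((PySem.List.pyGet? (pvGeos row col) d).getD 0) board color]) []
  (PySem.List.pyRange 0 8 1).foldl (fun acc d =>
    let p := (PySem.List.pyGet? pvDirs d).getD (0, 0)
    (PySem.List.pyRange 1 ((PySem.List.pyGet? limits d).getD 0 + 1) 1).foldl
      (fun a t => a ++ [(row + p.1 * t, col + p.2 * t)]) acc) []

-- ===== PRECONDITION & SPEC =====
-- a bound on any index a readable ray square can have: rays longer than this must leave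
-- the valid index range of the board at their very first square
def pvMaxExtent (board : List (List String)) : Int :=
  9 + board.length + (board.map (fun r => (r.length : Int))).foldr max 0

-- square (r, c) can be read as Python's board[r][c][0]: valid (possibly negative) row and
-- column index and a nonempty piece name
def pvReadableB (board : List (List String)) (r c : Int) : Bool :=
  decide (PySem.Raise.InRange board.length r) &&
  decide (PySem.Raise.InRange ((PySem.List.pyGet? board r).getD []).length c) &&
  (pvCellAt board r c != "")

-- square (r, c) holds a piece that stops a ray of this colour
def pvStopB (board : List (List String)) (color : String) (r c : Int) : Bool :=
  pvFirst0 (pvCellAt board r c) == color || pvFirst0 (pvCellAt board r c) == "b"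

-- Pre_ excludes exactly the inputs on which the Python programs raise IndexError: it holds
-- iff every square on each of the eight rays (whose geometric limit must fit the board
-- extent, else the first read already fails) is either readable or preceded on its ray by a
-- readable stopping piece, so every read that is actually reached succeeds.
def Pre_generate_queen_moves (row : Int) (col : Int) (board : List (List String)) (color : String) : Prop :=
  ∀ pg ∈ pvDirs.zip (pvGeos row col),
    pg.2 ≤ pvMaxExtent board ∧
    (PySem.List.pyRange 1 (min pg.2 (pvMaxExtent board) + 1) 1).all (fun t =>
      pvReadableB board (row + pg.1.1 * t) (col + pg.1.2 * t) ||
      (PySem.List.pyRange 1 t 1).any (fun u =>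
        pvReadableB board (row + pg.1.1 * u) (col + pg.1.2 * u) &&
        pvStopB board color (row + pg.1.1 * u) (col + pg.1.2 * u))) = true

instance (row : Int) (col : Int) (board : List (List String)) (color : String) : Decidable (Pre_generate_queen_moves row col board color) := by unfold Pre_generate_queen_moves; infer_instance

def pvWitness_generate_queen_moves : Int × Int × List (List String) × String :=
  (0, 2, [["--","--","--","--","--","--","--","--"],
          ["--","--","bp","--","--","--","--","--"],
          ["--","--","--","--","--","--","--","--"],
          ["--","--","--","--","--","--","--","--"],
          ["--","--","--","--","--","--","--","--"],
          ["--","--","--","--","--","--","--","--"],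
          ["--","--","--","--","--","--","--","--"],
          ["--","--","--","--","--","--","wp","--"]], "w")

def Spec_generate_queen_moves (row : Int) (col : Int) (board : List (List String)) (color : String) (out : List (Int × Int)) : Prop := out = generate_queen_moves_alt row col board color
instance (row : Int) (col : Int) (board : List (List String)) (color : String) (out : List (Int × Int)) : Decidable (Spec_generate_queen_moves row col board color out) := by unfold Spec_generate_queen_moves; infer_instance

-- ===== CLAIM (what is proved, stated in full; the proofs are below) =====
def Claim_equal_generate_queen_moves : Prop := ∀ (row : Int) (col : Int) (board : List (List String)) (color : String), Dom_generate_queen_moves row col board color → Pre_generate_queen_moves row col board color → Spec_generate_queen_moves row col board color (generate_queen_moves row col board color)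

-- ===== LEMMAS AND PROOFS =====

-- ---- proof-layer definitions ----

-- the piece name seen t steps along direction (dr,dc)
def pvRayP (row col dr dc : Int) (board : List (List String)) (t : Int) : String :=
  pvFirst0 (pvCellAt board (row + dr * t) (col + dc * t))

-- length of a ray's movable arm, walking from distance t with fuel steps left
def pvArmF (row col dr dc : Int) (board : List (List String)) (color : String) : Nat → Int → Int
  | 0, t => t - 1
  | fuel + 1, t =>
      if pvRayP row col dr dc board t == color then t - 1
      else if pvRayP row col dr dc board t == "b" then t
      else pvArmF row col dr dc board color fuel (t + 1)

theorem pvArmF_ge (row col dr dc : Int) (board : List (List String)) (color : String) :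
    ∀ (fuel : Nat) (t : Int), t - 1 ≤ pvArmF row col dr dc board color fuel t := by
  intro fuel
  induction fuel with
  | zero => intro t; simp [pvArmF]
  | succ fuel ih =>
    intro t
    simp only [pvArmF]
    split_ifs with h1 h2
    · omega
    · omega
    · have := ih (t + 1); omega

theorem pvARow_cons (row : Int) (board : List (List String)) (color : String) (i : Int) (is : List Int) :
    pvARow row board color (i :: is) =
      if pvFirst0 (pvCellAt board row i) == color then []
      else (row, i) :: (if pvFirst0 (pvCellAt board row i) == "b" then [] else pvARow row board color is) := by
  cases h : pvFirst0 (pvCellAt board row i) == color <;> simp [pvARow, h]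

theorem pvACol_cons (col : Int) (board : List (List String)) (color : String) (i : Int) (is : List Int) :
    pvACol col board color (i :: is) =
      if pvFirst0 (pvCellAt board i col) == color then []
      else (i, col) :: (if pvFirst0 (pvCellAt board i col) == "b" then [] else pvACol col board color is) := by
  cases h : pvFirst0 (pvCellAt board i col) == color <;> simp [pvACol, h]

theorem pvADiagUR_cons (row col : Int) (board : List (List String)) (color : String) (i : Int) (is : List Int) :
    pvADiagUR row col board color (i :: is) =
      if row - i ≥ 0 ∧ col + i < 8 then
        (if pvFirst0 (pvCellAt board (row - i) (col + i)) == color then []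
         else (row - i, col + i) ::
           (if pvFirst0 (pvCellAt board (row - i) (col + i)) == "b" then [] else pvADiagUR row col board color is))
      else pvADiagUR row col board color is := by
  by_cases hg : row - i ≥ 0 ∧ col + i < 8
  · cases h : pvFirst0 (pvCellAt board (row - i) (col + i)) == color <;> simp [pvADiagUR, hg, h]
  · simp only [pvADiagUR]; rw [if_neg hg, if_neg hg]

theorem pvADiagDL_cons (row col : Int) (board : List (List String)) (color : String) (i : Int) (is : List Int) :
    pvADiagDL row col board color (i :: is) =
      if col - i ≥ 0 ∧ row + i < 8 then
        (if pvFirst0 (pvCellAt board (row + i) (col - i)) == color then []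
         else (row + i, col - i) ::
           (if pvFirst0 (pvCellAt board (row + i) (col - i)) == "b" then [] else pvADiagDL row col board color is))
      else pvADiagDL row col board color is := by
  by_cases hg : col - i ≥ 0 ∧ row + i < 8
  · cases h : pvFirst0 (pvCellAt board (row + i) (col - i)) == color <;> simp [pvADiagDL, hg, h]
  · simp only [pvADiagDL]; rw [if_neg hg, if_neg hg]

theorem pvADiagUL_cons (row col : Int) (board : List (List String)) (color : String) (i : Int) (is : List Int) :
    pvADiagUL row col board color (i :: is) =
      if row - i ≥ 0 ∧ col - i ≥ 0 then
        (if pvFirst0 (pvCellAt board (row - i) (col - i)) == color then []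
         else (row - i, col - i) ::
           (if pvFirst0 (pvCellAt board (row - i) (col - i)) == "b" then [] else pvADiagUL row col board color is))
      else pvADiagUL row col board color is := by
  by_cases hg : row - i ≥ 0 ∧ col - i ≥ 0
  · cases h : pvFirst0 (pvCellAt board (row - i) (col - i)) == color <;> simp [pvADiagUL, h]
  · simp only [pvADiagUL]; rw [if_neg hg, if_neg hg]

theorem pvADiagDR_cons (row col : Int) (board : List (List String)) (color : String) (i : Int) (is : List Int) :
    pvADiagDR row col board color (i :: is) =
      if row + i < 8 ∧ col + i < 8 then
        (if pvFirst0 (pvCellAt board (row + i) (col + i)) == color then []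
         else (row + i, col + i) ::
           (if pvFirst0 (pvCellAt board (row + i) (col + i)) == "b" then [] else pvADiagDR row col board color is))
      else pvADiagDR row col board color is := by
  by_cases hg : row + i < 8 ∧ col + i < 8
  · cases h : pvFirst0 (pvCellAt board (row + i) (col + i)) == color <;> simp [pvADiagDR, hg, h]
  · simp only [pvADiagDR]; rw [if_neg hg, if_neg hg]

theorem pvADiagUR_all_off (row col : Int) (board : List (List String)) (color : String) :
    ∀ is : List Int, (∀ j ∈ is, ¬ (row - j ≥ 0 ∧ col + j < 8)) → pvADiagUR row col board color is = [] := by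
  intro is
  induction is with
  | nil => intro _; rfl
  | cons j is ih =>
    intro hall
    rw [pvADiagUR_cons, if_neg (hall j (List.mem_cons_self))]
    exact ih fun k hk => hall k (List.mem_cons_of_mem _ hk)

theorem pvADiagDL_all_off (row col : Int) (board : List (List String)) (color : String) :
    ∀ is : List Int, (∀ j ∈ is, ¬ (col - j ≥ 0 ∧ row + j < 8)) → pvADiagDL row col board color is = [] := by
  intro is
  induction is with
  | nil => intro _; rfl
  | cons j is ih =>
    intro hall
    rw [pvADiagDL_cons, if_neg (hall j (List.mem_cons_self))]
    exact ih fun k hk => hall k (List.mem_cons_of_mem _ hk)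

theorem pvADiagUL_all_off (row col : Int) (board : List (List String)) (color : String) :
    ∀ is : List Int, (∀ j ∈ is, ¬ (row - j ≥ 0 ∧ col - j ≥ 0)) → pvADiagUL row col board color is = [] := by
  intro is
  induction is with
  | nil => intro _; rfl
  | cons j is ih =>
    rw [pvADiagUL_cons]
    intro hall
    rw [if_neg (hall j (List.mem_cons_self))]
    exact ih fun k hk => hall k (List.mem_cons_of_mem _ hk)

theorem pvADiagDR_all_off (row col : Int) (board : List (List String)) (color : String) :
    ∀ is : List Int, (∀ j ∈ is, ¬ (row + j < 8 ∧ col + j < 8)) → pvADiagDR row col board color is = [] := by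
  intro is
  induction is with
  | nil => intro _; rfl
  | cons j is ih =>
    intro hall
    rw [pvADiagDR_cons, if_neg (hall j (List.mem_cons_self))]
    exact ih fun k hk => hall k (List.mem_cons_of_mem _ hk)

-- ---- turning the nested scan into a scalar fold per direction ----

theorem pvA_left (row col : Int) (board : List (List String)) (color : String) :
    ∀ (fuel : Nat) (t : Int), (fuel : Int) + t = col + 1 → 1 ≤ t →
      pvARow row board color (PySem.List.pyRange (col - t) (-1) (-1))
        = (PySem.List.pyRange t (pvArmF row col 0 (-1) board color fuel t + 1) 1).map
            (fun u => (row + 0 * u, col + (-1) * u)) := by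
  intro fuel
  induction fuel with
  | zero =>
    intro t ht _
    rw [show col - t = -1 by omega, PySem.List.pyRange_neg_one_eq_nil (by omega),
      show pvArmF row col 0 (-1) board color 0 t = t - 1 from rfl,
      PySem.List.pyRange_one_eq_nil (by omega)]
    rfl
  | succ fuel ih =>
    intro t ht ht1
    rw [PySem.List.pyRange_neg_one_cons (by omega : (-1 : Int) < col - t), pvARow_cons]
    have hray : pvRayP row col 0 (-1) board t = pvFirst0 (pvCellAt board row (col - t)) := by
      unfold pvRayP
      rw [show row + 0 * t = row by ring, show col + (-1) * t = col - t by ring]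
    simp only [pvArmF, hray]
    by_cases hown : (pvFirst0 (pvCellAt board row (col - t)) == color) = true
    · rw [if_pos hown, if_pos hown, PySem.List.pyRange_one_eq_nil (by omega)]
      rfl
    · rw [if_neg hown, if_neg hown]
      by_cases hbb : (pvFirst0 (pvCellAt board row (col - t)) == "b") = true
      · rw [if_pos hbb, if_pos hbb, PySem.List.pyRange_one_singleton, List.map_cons, List.map_nil]
        congr 1
        exact Prod.ext (by omega) (by omega)
      · rw [if_neg hbb, if_neg hbb, show col - t - 1 = col - (t + 1) by ring,
          PySem.List.pyRange_one_cons
            (show t < pvArmF row col 0 (-1) board color fuel (t + 1) + 1 by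
              have := pvArmF_ge row col 0 (-1) board color fuel (t + 1); omega),
          List.map_cons]
        congr 1
        · exact Prod.ext (by omega) (by omega)
        · exact ih (t + 1) (by omega) (by omega)

theorem pvA_right (row col : Int) (board : List (List String)) (color : String) :
    ∀ (fuel : Nat) (t : Int), (fuel : Int) + t = 7 - col + 1 → 1 ≤ t →
      pvARow row board color (PySem.List.pyRange (col + t) 8 1)
        = (PySem.List.pyRange t (pvArmF row col 0 1 board color fuel t + 1) 1).map
            (fun u => (row + 0 * u, col + 1 * u)) := by
  intro fuel
  induction fuel with
  | zero =>
    intro t ht _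
    rw [show col + t = 8 by omega, PySem.List.pyRange_one_eq_nil (by omega),
      show pvArmF row col 0 1 board color 0 t = t - 1 from rfl,
      PySem.List.pyRange_one_eq_nil (by omega)]
    rfl
  | succ fuel ih =>
    intro t ht ht1
    rw [PySem.List.pyRange_one_cons (by omega : col + t < 8), pvARow_cons]
    have hray : pvRayP row col 0 1 board t = pvFirst0 (pvCellAt board row (col + t)) := by
      unfold pvRayP
      rw [show row + 0 * t = row by ring, show col + 1 * t = col + t by ring]
    simp only [pvArmF, hray]
    by_cases hown : (pvFirst0 (pvCellAt board row (col + t)) == color) = true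
    · rw [if_pos hown, if_pos hown, PySem.List.pyRange_one_eq_nil (by omega)]
      rfl
    · rw [if_neg hown, if_neg hown]
      by_cases hbb : (pvFirst0 (pvCellAt board row (col + t)) == "b") = true
      · rw [if_pos hbb, if_pos hbb, PySem.List.pyRange_one_singleton, List.map_cons, List.map_nil]
        congr 1
        exact Prod.ext (by omega) (by omega)
      · rw [if_neg hbb, if_neg hbb, show col + t + 1 = col + (t + 1) by ring,
          PySem.List.pyRange_one_cons
            (show t < pvArmF row col 0 1 board color fuel (t + 1) + 1 by
              have := pvArmF_ge row col 0 1 board color fuel (t + 1); omega),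
          List.map_cons]
        congr 1
        · exact Prod.ext (by omega) (by omega)
        · exact ih (t + 1) (by omega) (by omega)

theorem pvA_down (row col : Int) (board : List (List String)) (color : String) :
    ∀ (fuel : Nat) (t : Int), (fuel : Int) + t = 7 - row + 1 → 1 ≤ t →
      pvACol col board color (PySem.List.pyRange (row + t) 8 1)
        = (PySem.List.pyRange t (pvArmF row col 1 0 board color fuel t + 1) 1).map
            (fun u => (row + 1 * u, col + 0 * u)) := by
  intro fuel
  induction fuel with
  | zero =>
    intro t ht _
    rw [show row + t = 8 by omega, PySem.List.pyRange_one_eq_nil (by omega),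
      show pvArmF row col 1 0 board color 0 t = t - 1 from rfl,
      PySem.List.pyRange_one_eq_nil (by omega)]
    rfl
  | succ fuel ih =>
    intro t ht ht1
    rw [PySem.List.pyRange_one_cons (by omega : row + t < 8), pvACol_cons]
    have hray : pvRayP row col 1 0 board t = pvFirst0 (pvCellAt board (row + t) col) := by
      unfold pvRayP
      rw [show row + 1 * t = row + t by ring, show col + 0 * t = col by ring]
    simp only [pvArmF, hray]
    by_cases hown : (pvFirst0 (pvCellAt board (row + t) col) == color) = true
    · rw [if_pos hown, if_pos hown, PySem.List.pyRange_one_eq_nil (by omega)]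
      rfl
    · rw [if_neg hown, if_neg hown]
      by_cases hbb : (pvFirst0 (pvCellAt board (row + t) col) == "b") = true
      · rw [if_pos hbb, if_pos hbb, PySem.List.pyRange_one_singleton, List.map_cons, List.map_nil]
        congr 1
        exact Prod.ext (by omega) (by omega)
      · rw [if_neg hbb, if_neg hbb, show row + t + 1 = row + (t + 1) by ring,
          PySem.List.pyRange_one_cons
            (show t < pvArmF row col 1 0 board color fuel (t + 1) + 1 by
              have := pvArmF_ge row col 1 0 board color fuel (t + 1); omega),
          List.map_cons]
        congr 1
        · exact Prod.ext (by omega) (by omega)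
        · exact ih (t + 1) (by omega) (by omega)

theorem pvA_up (row col : Int) (board : List (List String)) (color : String) :
    ∀ (fuel : Nat) (t : Int), (fuel : Int) + t = row + 1 → 1 ≤ t →
      pvACol col board color (PySem.List.pyRange (row - t) (-1) (-1))
        = (PySem.List.pyRange t (pvArmF row col (-1) 0 board color fuel t + 1) 1).map
            (fun u => (row + (-1) * u, col + 0 * u)) := by
  intro fuel
  induction fuel with
  | zero =>
    intro t ht _
    rw [show row - t = -1 by omega, PySem.List.pyRange_neg_one_eq_nil (by omega),
      show pvArmF row col (-1) 0 board color 0 t = t - 1 from rfl,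
      PySem.List.pyRange_one_eq_nil (by omega)]
    rfl
  | succ fuel ih =>
    intro t ht ht1
    rw [PySem.List.pyRange_neg_one_cons (by omega : (-1 : Int) < row - t), pvACol_cons]
    have hray : pvRayP row col (-1) 0 board t = pvFirst0 (pvCellAt board (row - t) col) := by
      unfold pvRayP
      rw [show row + (-1) * t = row - t by ring, show col + 0 * t = col by ring]
    simp only [pvArmF, hray]
    by_cases hown : (pvFirst0 (pvCellAt board (row - t) col) == color) = true
    · rw [if_pos hown, if_pos hown, PySem.List.pyRange_one_eq_nil (by omega)]
      rfl
    · rw [if_neg hown, if_neg hown]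
      by_cases hbb : (pvFirst0 (pvCellAt board (row - t) col) == "b") = true
      · rw [if_pos hbb, if_pos hbb, PySem.List.pyRange_one_singleton, List.map_cons, List.map_nil]
        congr 1
        exact Prod.ext (by omega) (by omega)
      · rw [if_neg hbb, if_neg hbb, show row - t - 1 = row - (t + 1) by ring,
          PySem.List.pyRange_one_cons
            (show t < pvArmF row col (-1) 0 board color fuel (t + 1) + 1 by
              have := pvArmF_ge row col (-1) 0 board color fuel (t + 1); omega),
          List.map_cons]
        congr 1
        · exact Prod.ext (by omega) (by omega)
        · exact ih (t + 1) (by omega) (by omega)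

theorem pvA_ur (row col : Int) (board : List (List String)) (color : String) :
    ∀ (fuel : Nat) (t : Int), (fuel : Int) + t = min 7 (min row (7 - col)) + 1 → 1 ≤ t →
      pvADiagUR row col board color (PySem.List.pyRange t 8 1)
        = (PySem.List.pyRange t (pvArmF row col (-1) 1 board color fuel t + 1) 1).map
            (fun u => (row + (-1) * u, col + 1 * u)) := by
  intro fuel
  induction fuel with
  | zero =>
    intro t ht _
    rw [pvADiagUR_all_off row col board color _
        (fun j hj => by rw [PySem.List.mem_pyRange_one] at hj; omega),
      show pvArmF row col (-1) 1 board color 0 t = t - 1 from rfl,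
      PySem.List.pyRange_one_eq_nil (by omega)]
    rfl
  | succ fuel ih =>
    intro t ht ht1
    rw [PySem.List.pyRange_one_cons (by omega : t < 8), pvADiagUR_cons,
      if_pos (⟨by omega, by omega⟩ : row - t ≥ 0 ∧ col + t < 8)]
    have hray : pvRayP row col (-1) 1 board t = pvFirst0 (pvCellAt board (row - t) (col + t)) := by
      unfold pvRayP
      rw [show row + (-1) * t = row - t by ring, show col + 1 * t = col + t by ring]
    simp only [pvArmF, hray]
    by_cases hown : (pvFirst0 (pvCellAt board (row - t) (col + t)) == color) = true
    · rw [if_pos hown, if_pos hown, PySem.List.pyRange_one_eq_nil (by omega)]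
      rfl
    · rw [if_neg hown, if_neg hown]
      by_cases hbb : (pvFirst0 (pvCellAt board (row - t) (col + t)) == "b") = true
      · rw [if_pos hbb, if_pos hbb, PySem.List.pyRange_one_singleton, List.map_cons, List.map_nil]
        congr 1
        exact Prod.ext (by omega) (by omega)
      · rw [if_neg hbb, if_neg hbb,
          PySem.List.pyRange_one_cons
            (show t < pvArmF row col (-1) 1 board color fuel (t + 1) + 1 by
              have := pvArmF_ge row col (-1) 1 board color fuel (t + 1); omega),
          List.map_cons]
        congr 1
        · exact Prod.ext (by omega) (by omega)
        · exact ih (t + 1) (by omega) (by omega)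

theorem pvA_dl (row col : Int) (board : List (List String)) (color : String) :
    ∀ (fuel : Nat) (t : Int), (fuel : Int) + t = min 7 (min col (7 - row)) + 1 → 1 ≤ t →
      pvADiagDL row col board color (PySem.List.pyRange t 8 1)
        = (PySem.List.pyRange t (pvArmF row col 1 (-1) board color fuel t + 1) 1).map
            (fun u => (row + 1 * u, col + (-1) * u)) := by
  intro fuel
  induction fuel with
  | zero =>
    intro t ht _
    rw [pvADiagDL_all_off row col board color _
        (fun j hj => by rw [PySem.List.mem_pyRange_one] at hj; omega),
      show pvArmF row col 1 (-1) board color 0 t = t - 1 from rfl,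
      PySem.List.pyRange_one_eq_nil (by omega)]
    rfl
  | succ fuel ih =>
    intro t ht ht1
    rw [PySem.List.pyRange_one_cons (by omega : t < 8), pvADiagDL_cons,
      if_pos (⟨by omega, by omega⟩ : col - t ≥ 0 ∧ row + t < 8)]
    have hray : pvRayP row col 1 (-1) board t = pvFirst0 (pvCellAt board (row + t) (col - t)) := by
      unfold pvRayP
      rw [show row + 1 * t = row + t by ring, show col + (-1) * t = col - t by ring]
    simp only [pvArmF, hray]
    by_cases hown : (pvFirst0 (pvCellAt board (row + t) (col - t)) == color) = true
    · rw [if_pos hown, if_pos hown, PySem.List.pyRange_one_eq_nil (by omega)]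
      rfl
    · rw [if_neg hown, if_neg hown]
      by_cases hbb : (pvFirst0 (pvCellAt board (row + t) (col - t)) == "b") = true
      · rw [if_pos hbb, if_pos hbb, PySem.List.pyRange_one_singleton, List.map_cons, List.map_nil]
        congr 1
        exact Prod.ext (by omega) (by omega)
      · rw [if_neg hbb, if_neg hbb,
          PySem.List.pyRange_one_cons
            (show t < pvArmF row col 1 (-1) board color fuel (t + 1) + 1 by
              have := pvArmF_ge row col 1 (-1) board color fuel (t + 1); omega),
          List.map_cons]
        congr 1
        · exact Prod.ext (by omega) (by omega)
        · exact ih (t + 1) (by omega) (by omega)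

theorem pvA_ul (row col : Int) (board : List (List String)) (color : String) :
    ∀ (fuel : Nat) (t : Int), (fuel : Int) + t = min 7 (min row col) + 1 → 1 ≤ t →
      pvADiagUL row col board color (PySem.List.pyRange t 8 1)
        = (PySem.List.pyRange t (pvArmF row col (-1) (-1) board color fuel t + 1) 1).map
            (fun u => (row + (-1) * u, col + (-1) * u)) := by
  intro fuel
  induction fuel with
  | zero =>
    intro t ht _
    rw [pvADiagUL_all_off row col board color _
        (fun j hj => by rw [PySem.List.mem_pyRange_one] at hj; omega),
      show pvArmF row col (-1) (-1) board color 0 t = t - 1 from rfl,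
      PySem.List.pyRange_one_eq_nil (by omega)]
    rfl
  | succ fuel ih =>
    intro t ht ht1
    rw [PySem.List.pyRange_one_cons (by omega : t < 8), pvADiagUL_cons,
      if_pos (⟨by omega, by omega⟩ : row - t ≥ 0 ∧ col - t ≥ 0)]
    have hray : pvRayP row col (-1) (-1) board t = pvFirst0 (pvCellAt board (row - t) (col - t)) := by
      unfold pvRayP
      rw [show row + (-1) * t = row - t by ring, show col + (-1) * t = col - t by ring]
    simp only [pvArmF, hray]
    by_cases hown : (pvFirst0 (pvCellAt board (row - t) (col - t)) == color) = true
    · rw [if_pos hown, if_pos hown, PySem.List.pyRange_one_eq_nil (by omega)]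
      rfl
    · rw [if_neg hown, if_neg hown]
      by_cases hbb : (pvFirst0 (pvCellAt board (row - t) (col - t)) == "b") = true
      · rw [if_pos hbb, if_pos hbb, PySem.List.pyRange_one_singleton, List.map_cons, List.map_nil]
        congr 1
        exact Prod.ext (by omega) (by omega)
      · rw [if_neg hbb, if_neg hbb,
          PySem.List.pyRange_one_cons
            (show t < pvArmF row col (-1) (-1) board color fuel (t + 1) + 1 by
              have := pvArmF_ge row col (-1) (-1) board color fuel (t + 1); omega),
          List.map_cons]
        congr 1
        · exact Prod.ext (by omega) (by omega)
        · exact ih (t + 1) (by omega) (by omega)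

theorem pvA_dr (row col : Int) (board : List (List String)) (color : String) :
    ∀ (fuel : Nat) (t : Int), (fuel : Int) + t = min 7 (min (7 - row) (7 - col)) + 1 → 1 ≤ t →
      pvADiagDR row col board color (PySem.List.pyRange t 8 1)
        = (PySem.List.pyRange t (pvArmF row col 1 1 board color fuel t + 1) 1).map
            (fun u => (row + 1 * u, col + 1 * u)) := by
  intro fuel
  induction fuel with
  | zero =>
    intro t ht _
    rw [pvADiagDR_all_off row col board color _
        (fun j hj => by rw [PySem.List.mem_pyRange_one] at hj; omega),
      show pvArmF row col 1 1 board color 0 t = t - 1 from rfl,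
      PySem.List.pyRange_one_eq_nil (by omega)]
    rfl
  | succ fuel ih =>
    intro t ht ht1
    rw [PySem.List.pyRange_one_cons (by omega : t < 8), pvADiagDR_cons,
      if_pos (⟨by omega, by omega⟩ : row + t < 8 ∧ col + t < 8)]
    have hray : pvRayP row col 1 1 board t = pvFirst0 (pvCellAt board (row + t) (col + t)) := by
      unfold pvRayP
      rw [show row + 1 * t = row + t by ring, show col + 1 * t = col + t by ring]
    simp only [pvArmF, hray]
    by_cases hown : (pvFirst0 (pvCellAt board (row + t) (col + t)) == color) = true
    · rw [if_pos hown, if_pos hown, PySem.List.pyRange_one_eq_nil (by omega)]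
      rfl
    · rw [if_neg hown, if_neg hown]
      by_cases hbb : (pvFirst0 (pvCellAt board (row + t) (col + t)) == "b") = true
      · rw [if_pos hbb, if_pos hbb, PySem.List.pyRange_one_singleton, List.map_cons, List.map_nil]
        congr 1
        exact Prod.ext (by omega) (by omega)
      · rw [if_neg hbb, if_neg hbb,
          PySem.List.pyRange_one_cons
            (show t < pvArmF row col 1 1 board color fuel (t + 1) + 1 by
              have := pvArmF_ge row col 1 1 board color fuel (t + 1); omega),
          List.map_cons]
        congr 1
        · exact Prod.ext (by omega) (by omega)
        · exact ih (t + 1) (by omega) (by omega)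

theorem pvGet8_0 {α : Type} (z a0 a1 a2 a3 a4 a5 a6 a7 : α) :
    (PySem.List.pyGet? [a0, a1, a2, a3, a4, a5, a6, a7] (0 : Int)).getD z = a0 := by
  rw [PySem.List.pyGet?_of_nonneg _ (show (0 : Int) ≤ 0 by norm_num)]
  rfl
theorem pvGet8_1 {α : Type} (z a0 a1 a2 a3 a4 a5 a6 a7 : α) :
    (PySem.List.pyGet? [a0, a1, a2, a3, a4, a5, a6, a7] (1 : Int)).getD z = a1 := by
  rw [PySem.List.pyGet?_of_nonneg _ (show (0 : Int) ≤ 1 by norm_num)]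
  rfl
theorem pvGet8_2 {α : Type} (z a0 a1 a2 a3 a4 a5 a6 a7 : α) :
    (PySem.List.pyGet? [a0, a1, a2, a3, a4, a5, a6, a7] (2 : Int)).getD z = a2 := by
  rw [PySem.List.pyGet?_of_nonneg _ (show (0 : Int) ≤ 2 by norm_num)]
  rfl
theorem pvGet8_3 {α : Type} (z a0 a1 a2 a3 a4 a5 a6 a7 : α) :
    (PySem.List.pyGet? [a0, a1, a2, a3, a4, a5, a6, a7] (3 : Int)).getD z = a3 := by
  rw [PySem.List.pyGet?_of_nonneg _ (show (0 : Int) ≤ 3 by norm_num)]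
  rfl
theorem pvGet8_4 {α : Type} (z a0 a1 a2 a3 a4 a5 a6 a7 : α) :
    (PySem.List.pyGet? [a0, a1, a2, a3, a4, a5, a6, a7] (4 : Int)).getD z = a4 := by
  rw [PySem.List.pyGet?_of_nonneg _ (show (0 : Int) ≤ 4 by norm_num)]
  rfl
theorem pvGet8_5 {α : Type} (z a0 a1 a2 a3 a4 a5 a6 a7 : α) :
    (PySem.List.pyGet? [a0, a1, a2, a3, a4, a5, a6, a7] (5 : Int)).getD z = a5 := by
  rw [PySem.List.pyGet?_of_nonneg _ (show (0 : Int) ≤ 5 by norm_num)]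
  rfl
theorem pvGet8_6 {α : Type} (z a0 a1 a2 a3 a4 a5 a6 a7 : α) :
    (PySem.List.pyGet? [a0, a1, a2, a3, a4, a5, a6, a7] (6 : Int)).getD z = a6 := by
  rw [PySem.List.pyGet?_of_nonneg _ (show (0 : Int) ≤ 6 by norm_num)]
  rfl
theorem pvGet8_7 {α : Type} (z a0 a1 a2 a3 a4 a5 a6 a7 : α) :
    (PySem.List.pyGet? [a0, a1, a2, a3, a4, a5, a6, a7] (7 : Int)).getD z = a7 := by
  rw [PySem.List.pyGet?_of_nonneg _ (show (0 : Int) ≤ 7 by norm_num)]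
  rfl

theorem pvLimitLoop_eq_arm (row col dr dc : Int) (board : List (List String)) (color : String)
    (geo : Int) :
    ∀ (fuel : Nat) (t : Int), (fuel : Int) + t = geo + 1 →
      pvRayLimitLoop row col dr dc board color geo (PySem.List.pyRange t (geo + 1) 1)
        = pvArmF row col dr dc board color fuel t := by
  intro fuel
  induction fuel with
  | zero =>
    intro t ht
    rw [PySem.List.pyRange_one_eq_nil (by omega)]
    show geo = t - 1
    omega
  | succ fuel ih =>
    intro t ht
    rw [PySem.List.pyRange_one_cons (by omega : t < geo + 1)]
    simp only [pvRayLimitLoop, pvArmF, pvRayP]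
    rw [ih (t + 1) (by omega)]
    rfl

-- ===== VERDICT (by name: the statement is the Claim_ definition above) =====
theorem generate_queen_moves_spec : Claim_equal_generate_queen_moves := by
  intro row col board color _ _
  unfold Spec_generate_queen_moves
  have hrange : PySem.List.pyRange 0 8 1 = [0, 1, 2, 3, 4, 5, 6, 7] := by decide
  simp only [generate_queen_moves_alt, pvDirs, pvGeos, hrange, List.foldl_cons, List.foldl_nil,
    PySem.List.foldl_append_singleton_eq_map, List.nil_append, List.cons_append,
    pvGet8_0, pvGet8_1, pvGet8_2, pvGet8_3, pvGet8_4, pvGet8_5, pvGet8_6, pvGet8_7]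
  have E0 : pvARow row board color (PySem.List.pyRange (col - 1) (-1) (-1))
      = (PySem.List.pyRange 1 (pvRayLimit row col 0 (-1) (col) board color + 1) 1).map
          (fun u => (row + 0 * u, col + (-1) * u)) := by
    unfold pvRayLimit
    by_cases hg : 0 ≤ col
    · rw [pvLimitLoop_eq_arm row col 0 (-1) board color (col) (col).toNat 1 (by omega)]
      exact pvA_left row col board color (col).toNat 1 (by omega) (le_refl 1)
    · rw [PySem.List.pyRange_one_eq_nil (show (col) + 1 ≤ 1 by omega),
        show pvRayLimitLoop row col 0 (-1) board color (col) [] = (col) from rfl,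
        PySem.List.pyRange_one_eq_nil (show (col) + 1 ≤ 1 by omega),
        PySem.List.pyRange_neg_one_eq_nil (show col - 1 ≤ -1 by omega), List.map_nil]
      rfl
  have E1 : pvARow row board color (PySem.List.pyRange (col + 1) 8 1)
      = (PySem.List.pyRange 1 (pvRayLimit row col 0 1 (7 - col) board color + 1) 1).map
          (fun u => (row + 0 * u, col + 1 * u)) := by
    unfold pvRayLimit
    by_cases hg : 0 ≤ 7 - col
    · rw [pvLimitLoop_eq_arm row col 0 1 board color (7 - col) (7 - col).toNat 1 (by omega)]
      exact pvA_right row col board color (7 - col).toNat 1 (by omega) (le_refl 1)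
    · rw [PySem.List.pyRange_one_eq_nil (show (7 - col) + 1 ≤ 1 by omega),
        show pvRayLimitLoop row col 0 1 board color (7 - col) [] = (7 - col) from rfl,
        PySem.List.pyRange_one_eq_nil (show (7 - col) + 1 ≤ 1 by omega),
        PySem.List.pyRange_one_eq_nil (show (8:Int) ≤ col + 1 by omega), List.map_nil]
      rfl
  have E2 : pvACol col board color (PySem.List.pyRange (row + 1) 8 1)
      = (PySem.List.pyRange 1 (pvRayLimit row col 1 0 (7 - row) board color + 1) 1).map
          (fun u => (row + 1 * u, col + 0 * u)) := by
    unfold pvRayLimit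
    by_cases hg : 0 ≤ 7 - row
    · rw [pvLimitLoop_eq_arm row col 1 0 board color (7 - row) (7 - row).toNat 1 (by omega)]
      exact pvA_down row col board color (7 - row).toNat 1 (by omega) (le_refl 1)
    · rw [PySem.List.pyRange_one_eq_nil (show (7 - row) + 1 ≤ 1 by omega),
        show pvRayLimitLoop row col 1 0 board color (7 - row) [] = (7 - row) from rfl,
        PySem.List.pyRange_one_eq_nil (show (7 - row) + 1 ≤ 1 by omega),
        PySem.List.pyRange_one_eq_nil (show (8:Int) ≤ row + 1 by omega), List.map_nil]
      rfl
  have E3 : pvACol col board color (PySem.List.pyRange (row - 1) (-1) (-1))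
      = (PySem.List.pyRange 1 (pvRayLimit row col (-1) 0 (row) board color + 1) 1).map
          (fun u => (row + (-1) * u, col + 0 * u)) := by
    unfold pvRayLimit
    by_cases hg : 0 ≤ row
    · rw [pvLimitLoop_eq_arm row col (-1) 0 board color (row) (row).toNat 1 (by omega)]
      exact pvA_up row col board color (row).toNat 1 (by omega) (le_refl 1)
    · rw [PySem.List.pyRange_one_eq_nil (show (row) + 1 ≤ 1 by omega),
        show pvRayLimitLoop row col (-1) 0 board color (row) [] = (row) from rfl,
        PySem.List.pyRange_one_eq_nil (show (row) + 1 ≤ 1 by omega),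
        PySem.List.pyRange_neg_one_eq_nil (show row - 1 ≤ -1 by omega), List.map_nil]
      rfl
  have E4 : pvADiagUR row col board color (PySem.List.pyRange 1 8 1)
      = (PySem.List.pyRange 1 (pvRayLimit row col (-1) 1 (min 7 (min row (7 - col))) board color + 1) 1).map
          (fun u => (row + (-1) * u, col + 1 * u)) := by
    unfold pvRayLimit
    by_cases hg : 0 ≤ min 7 (min row (7 - col))
    · rw [pvLimitLoop_eq_arm row col (-1) 1 board color (min 7 (min row (7 - col))) (min 7 (min row (7 - col))).toNat 1 (by omega)]
      exact pvA_ur row col board color (min 7 (min row (7 - col))).toNat 1 (by omega) (le_refl 1)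
    · rw [PySem.List.pyRange_one_eq_nil (show (min 7 (min row (7 - col))) + 1 ≤ 1 by omega),
        show pvRayLimitLoop row col (-1) 1 board color (min 7 (min row (7 - col))) [] = (min 7 (min row (7 - col))) from rfl,
        PySem.List.pyRange_one_eq_nil (show (min 7 (min row (7 - col))) + 1 ≤ 1 by omega), List.map_nil]
      exact pvADiagUR_all_off row col board color _ (fun j hj => by
        rw [PySem.List.mem_pyRange_one] at hj; omega)
  have E5 : pvADiagDL row col board color (PySem.List.pyRange 1 8 1)
      = (PySem.List.pyRange 1 (pvRayLimit row col 1 (-1) (min 7 (min col (7 - row))) board color + 1) 1).map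
          (fun u => (row + 1 * u, col + (-1) * u)) := by
    unfold pvRayLimit
    by_cases hg : 0 ≤ min 7 (min col (7 - row))
    · rw [pvLimitLoop_eq_arm row col 1 (-1) board color (min 7 (min col (7 - row))) (min 7 (min col (7 - row))).toNat 1 (by omega)]
      exact pvA_dl row col board color (min 7 (min col (7 - row))).toNat 1 (by omega) (le_refl 1)
    · rw [PySem.List.pyRange_one_eq_nil (show (min 7 (min col (7 - row))) + 1 ≤ 1 by omega),
        show pvRayLimitLoop row col 1 (-1) board color (min 7 (min col (7 - row))) [] = (min 7 (min col (7 - row))) from rfl,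
        PySem.List.pyRange_one_eq_nil (show (min 7 (min col (7 - row))) + 1 ≤ 1 by omega), List.map_nil]
      exact pvADiagDL_all_off row col board color _ (fun j hj => by
        rw [PySem.List.mem_pyRange_one] at hj; omega)
  have E6 : pvADiagUL row col board color (PySem.List.pyRange 1 8 1)
      = (PySem.List.pyRange 1 (pvRayLimit row col (-1) (-1) (min 7 (min row col)) board color + 1) 1).map
          (fun u => (row + (-1) * u, col + (-1) * u)) := by
    unfold pvRayLimit
    by_cases hg : 0 ≤ min 7 (min row col)
    · rw [pvLimitLoop_eq_arm row col (-1) (-1) board color (min 7 (min row col)) (min 7 (min row col)).toNat 1 (by omega)]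
      exact pvA_ul row col board color (min 7 (min row col)).toNat 1 (by omega) (le_refl 1)
    · rw [PySem.List.pyRange_one_eq_nil (show (min 7 (min row col)) + 1 ≤ 1 by omega),
        show pvRayLimitLoop row col (-1) (-1) board color (min 7 (min row col)) [] = (min 7 (min row col)) from rfl,
        PySem.List.pyRange_one_eq_nil (show (min 7 (min row col)) + 1 ≤ 1 by omega), List.map_nil]
      exact pvADiagUL_all_off row col board color _ (fun j hj => by
        rw [PySem.List.mem_pyRange_one] at hj; omega)
  have E7 : pvADiagDR row col board color (PySem.List.pyRange 1 8 1)
      = (PySem.List.pyRange 1 (pvRayLimit row col 1 1 (min 7 (min (7 - row) (7 - col))) board color + 1) 1).map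
          (fun u => (row + 1 * u, col + 1 * u)) := by
    unfold pvRayLimit
    by_cases hg : 0 ≤ min 7 (min (7 - row) (7 - col))
    · rw [pvLimitLoop_eq_arm row col 1 1 board color (min 7 (min (7 - row) (7 - col))) (min 7 (min (7 - row) (7 - col))).toNat 1 (by omega)]
      exact pvA_dr row col board color (min 7 (min (7 - row) (7 - col))).toNat 1 (by omega) (le_refl 1)
    · rw [PySem.List.pyRange_one_eq_nil (show (min 7 (min (7 - row) (7 - col))) + 1 ≤ 1 by omega),
        show pvRayLimitLoop row col 1 1 board color (min 7 (min (7 - row) (7 - col))) [] = (min 7 (min (7 - row) (7 - col))) from rfl,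
        PySem.List.pyRange_one_eq_nil (show (min 7 (min (7 - row) (7 - col))) + 1 ≤ 1 by omega), List.map_nil]
      exact pvADiagDR_all_off row col board color _ (fun j hj => by
        rw [PySem.List.mem_pyRange_one] at hj; omega)
  unfold generate_queen_moves
  rw [E0, E1, E2, E3, E4, E5, E6, E7]
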